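-- pv_equiv track=rewrite | github.com/stevenlee168/stevenserver | app.py | add_laser_process_param
-- ===== SOURCE A (Python) =====
-- def add_laser_process_param(text, param_map, laser_prc_par):
--     """
--     Thêm Laser_Process_Param_In vào sau MoveL khi:
--     - Trước MoveL là Laser_Punch_Cir_* và sau là MoveL => thêm 'Laser_Process_Param_In 25;'
--     - Trước MoveL là Laser_Punch_* và sau là MoveL => thêm 'Laser_Process_Param_In {param};'
--     """
--
--     lines = text.split("\n")
--     new_lines = []
--     current_section = ""
--
--     for i, line in enumerate(lines):
--         new_lines.append(line)  # giữ dòng hiện tại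
--
--         # Track current section title
--         if line.strip().startswith("! ---"):
--             current_section = (
--                 line.replace("! ---", "").replace("---", "").strip().lower()
--             )
--
--         # Nếu là MoveL
--         if line.strip().startswith("MoveL"):
--             prev_line = lines[i - 1].strip() if i > 0 else ""
--             next_line = lines[i + 1].strip() if i + 1 < len(lines) else ""
--             param = param_map.get(current_section, laser_prc_par)  # default
--
--             if prev_line.startswith("Laser_Punch_Cir_") and next_line.startswith("MoveL"):
--                 new_lines.append("    Laser_Process_Param_In 25;")
--             elif prev_line.startswith("Laser_Punch_") and next_line.startswith("MoveL"):
--                 new_lines.append(f"    Laser_Process_Param_In {param};")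
--
--     return "\n".join(new_lines)
-- ===== SOURCE B (Python) =====
-- def _is_header(line):
--     return line.strip().startswith("! ---")
--
--
-- def _title(line):
--     return line.replace("! ---", "").replace("---", "").strip().lower()
--
--
-- def _blocks(lines):
--     # Partition lines into blocks: each '! ---' header line starts a new block.
--     blocks = []
--     while lines:
--         head, rest = lines[0], lines[1:]
--         j = 0
--         while j < len(rest) and not _is_header(rest[j]):
--             j += 1
--         blocks.append([head] + rest[:j])
--         lines = rest[j:]
--     return blocks
--
--
-- def _process(chunk, param):
--     # Stateless, purely local processing of one block with its fixed param.
--     res = []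
--     for j, line in enumerate(chunk):
--         res.append(line)
--         if line.strip().startswith("MoveL"):
--             prev = chunk[j - 1].strip() if j > 0 else ""
--             nxt = chunk[j + 1].strip() if j + 1 < len(chunk) else ""
--             if prev.startswith("Laser_Punch_Cir_") and nxt.startswith("MoveL"):
--                 res.append("    Laser_Process_Param_In 25;")
--             elif prev.startswith("Laser_Punch_") and nxt.startswith("MoveL"):
--                 res.append(f"    Laser_Process_Param_In {param};")
--     return res
--
--
-- def add_laser_process_param(text, param_map, laser_prc_par):
--     out = []
--     for chunk in _blocks(text.split("\n")):
--         sec = _title(chunk[0]) if _is_header(chunk[0]) else ""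
--         out.extend(_process(chunk, param_map.get(sec, laser_prc_par)))
--     return "\n".join(out)
-- ===== Notes on version B (the rewrite author's own statement) =====
-- stated objective: alternative
-- what changed: Replaced A's single stateful scan (running current_section, global line indices) by a partition of the lines into header-delimited blocks, each block then processed independently and statelessly with purely local neighbour lookups and its laser param resolved once per block.
import Mathlib
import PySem

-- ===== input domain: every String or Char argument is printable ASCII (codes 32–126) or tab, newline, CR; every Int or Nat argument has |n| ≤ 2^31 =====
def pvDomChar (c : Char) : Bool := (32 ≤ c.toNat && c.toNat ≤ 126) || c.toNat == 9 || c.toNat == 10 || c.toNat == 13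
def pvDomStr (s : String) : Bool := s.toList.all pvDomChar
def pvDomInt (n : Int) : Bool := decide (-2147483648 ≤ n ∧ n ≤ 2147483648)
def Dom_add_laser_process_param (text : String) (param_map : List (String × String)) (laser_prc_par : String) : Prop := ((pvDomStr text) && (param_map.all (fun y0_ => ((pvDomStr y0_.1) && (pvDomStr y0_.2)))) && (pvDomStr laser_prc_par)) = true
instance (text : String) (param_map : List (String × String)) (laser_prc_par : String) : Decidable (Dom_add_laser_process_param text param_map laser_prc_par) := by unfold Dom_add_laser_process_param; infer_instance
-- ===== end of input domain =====

-- B replaces A's single stateful scan by a partition into header-delimited blocks, each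
-- processed independently (stateless, local neighbours, param resolved once per block)
-- (objective: alternative decomposition, same cost).

-- shared helpers of both ports (the same tests A's and B's Python both perform)
def pvIsHeader (l : String) : Bool := PySem.Str.startswith (PySem.Str.strip l) "! ---"
def pvIsMoveL (l : String) : Bool := PySem.Str.startswith (PySem.Str.strip l) "MoveL"
def pvParseSection (line : String) : String :=
  PySem.Str.lower (PySem.Str.strip (PySem.Str.replace (PySem.Str.replace line "! ---" "") "---" ""))

-- ===== PORT A =====

-- one iteration of A's loop body over (new_lines, current_section)
def pvAStep (lines : List String) (param_map : List (String × String)) (laser_prc_par : String)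
    (st : List String × String) (p : Int × String) : List String × String :=
  let i := p.1
  let line := p.2
  let new_lines := st.1 ++ [line]
  let current_section := if pvIsHeader line then pvParseSection line else st.2
  if pvIsMoveL line then
    let prev_line := if i > 0 then PySem.Str.strip (PySem.List.pyGetD lines (i - 1) "") else ""
    let next_line := if i + 1 < (lines.length : Int) then PySem.Str.strip (PySem.List.pyGetD lines (i + 1) "") else ""
    let param := (PySem.Dict.mk param_map).getD current_section laser_prc_par
    if PySem.Str.startswith prev_line "Laser_Punch_Cir_" && PySem.Str.startswith next_line "MoveL" then
      (new_lines ++ ["    Laser_Process_Param_In 25;"], current_section)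
    else if PySem.Str.startswith prev_line "Laser_Punch_" && PySem.Str.startswith next_line "MoveL" then
      (new_lines ++ ["    Laser_Process_Param_In " ++ param ++ ";"], current_section)
    else (new_lines, current_section)
  else (new_lines, current_section)

def add_laser_process_param (text : String) (param_map : List (String × String)) (laser_prc_par : String) : String :=
  let lines := (PySem.Str.split? text "\n").getD []  -- sep "\n" ≠ "", so split? is always some
  PySem.Str.join "\n"
    ((List.foldl (pvAStep lines param_map laser_prc_par) ([], "") (PySem.List.enumerate lines 0)).1)

-- ===== PORT B =====

-- partition into blocks: every header line starts a new block
def pvBlocks : List String → List (List String)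
  | [] => []
  | l :: ls =>
    (l :: ls.takeWhile (fun x => !pvIsHeader x)) :: pvBlocks (ls.dropWhile (fun x => !pvIsHeader x))
  termination_by xs => xs.length
  decreasing_by
    simp only [List.length_cons]
    exact Nat.lt_succ_of_le (List.length_dropWhile_le _ _)

-- stateless processing of one block: local index j, neighbours from the block itself
def pvProcAux (chunk : List String) (param : String) : Int → List String → List String
  | _, [] => []
  | j, line :: rest =>
    let tail := pvProcAux chunk param (j + 1) rest
    if pvIsMoveL line then
      let prev := if j > 0 then PySem.Str.strip (PySem.List.pyGetD chunk (j - 1) "") else ""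
      let nxt := if j + 1 < (chunk.length : Int) then PySem.Str.strip (PySem.List.pyGetD chunk (j + 1) "") else ""
      if PySem.Str.startswith prev "Laser_Punch_Cir_" && PySem.Str.startswith nxt "MoveL" then
        line :: "    Laser_Process_Param_In 25;" :: tail
      else if PySem.Str.startswith prev "Laser_Punch_" && PySem.Str.startswith nxt "MoveL" then
        line :: ("    Laser_Process_Param_In " ++ param ++ ";") :: tail
      else line :: tail
    else line :: tail

-- one block's output: section and param fixed once for the whole block
def pvBlockOut (param_map : List (String × String)) (laser_prc_par : String) (chunk : List String) : List String :=
  let sec := if pvIsHeader (chunk.headD "") then pvParseSection (chunk.headD "") else ""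
  pvProcAux chunk ((PySem.Dict.mk param_map).getD sec laser_prc_par) 0 chunk

def add_laser_process_param_alt (text : String) (param_map : List (String × String)) (laser_prc_par : String) : String :=
  let lines := (PySem.Str.split? text "\n").getD []  -- sep "\n" ≠ "", so split? is always some
  PySem.Str.join "\n" ((pvBlocks lines).flatMap (pvBlockOut param_map laser_prc_par))

-- ===== PRECONDITION & SPEC =====
def Spec_add_laser_process_param (text : String) (param_map : List (String × String)) (laser_prc_par : String) (out : String) : Prop := out = add_laser_process_param_alt text param_map laser_prc_par
instance (text : String) (param_map : List (String × String)) (laser_prc_par : String) (out : String) : Decidable (Spec_add_laser_process_param text param_map laser_prc_par out) := by unfold Spec_add_laser_process_param; infer_instance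

-- ===== CLAIM (what is proved, stated in full; the proofs are below) =====
def Claim_equal_add_laser_process_param : Prop := ∀ (text : String) (param_map : List (String × String)) (laser_prc_par : String), Dom_add_laser_process_param text param_map laser_prc_par → Spec_add_laser_process_param text param_map laser_prc_par (add_laser_process_param text param_map laser_prc_par)

-- ===== LEMMAS AND PROOFS =====

-- a header line (stripped, starts with "! ---") cannot start with "MoveL"
theorem pv_header_not_moveL (x : String) (h : pvIsHeader x = true) : pvIsMoveL x = false := by
  unfold pvIsHeader at h
  unfold pvIsMoveL
  simp only [PySem.Str.startswith_eq] at h ⊢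
  rw [PySem.Chars.startswith_iff] at h
  rw [Bool.eq_false_iff, ne_eq, PySem.Chars.startswith_iff]
  obtain ⟨t, ht⟩ := h
  intro ⟨t', ht'⟩
  rw [← ht'] at ht
  have h1 : "! ---".toList = ['!',' ','-','-','-'] := by decide
  have h2 : "MoveL".toList = ['M','o','v','e','L'] := by decide
  rw [h1, h2] at ht
  simp at ht

-- indexing a suffix of lines through the block decomposition
theorem pv_getD_lines (lines bl rest' : List String) (i0 : ℕ)
    (hdrop : lines.drop i0 = bl ++ rest') (k : ℕ) (hk : k < bl.length) :
    lines.getD (i0 + k) "" = bl.getD k "" := by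
  rw [List.getD_eq_getElem?_getD, List.getD_eq_getElem?_getD, ← List.getElem?_drop, hdrop,
    List.getElem?_append_left hk]

theorem pv_len (lines bl rest' : List String) (i0 : ℕ)
    (hdrop : lines.drop i0 = bl ++ rest') (hbl : bl ≠ []) :
    lines.length = i0 + bl.length + rest'.length := by
  have h1 : (lines.drop i0).length = lines.length - i0 := List.length_drop
  rw [hdrop, List.length_append] at h1
  have : 0 < bl.length := List.length_pos_of_ne_nil hbl
  omega

-- through the non-header portion of a block, A's fold equals B's local processing
theorem pv_tail (lines : List String) (pm : List (String × String)) (lp : String)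
    (bl rest' : List String) (i0 : ℕ)
    (hdrop : lines.drop i0 = bl ++ rest')
    (hrest : rest' = [] ∨ pvIsHeader (rest'.headD "") = true) (s : String) :
    ∀ (tl : List String) (j : ℕ) (acc : List String), tl = bl.drop j → (j = 0 → i0 = 0) →
      (∀ x ∈ tl, pvIsHeader x = false) →
      List.foldl (pvAStep lines pm lp) (acc, s) (PySem.List.enumerate tl ((i0 + j : ℕ) : Int))
        = (acc ++ pvProcAux bl ((PySem.Dict.mk pm).getD s lp) ((j : ℕ) : Int) tl, s) := by
  intro tl
  induction tl with
  | nil => intro j acc _ _ _; simp [PySem.List.enumerate, pvProcAux]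
  | cons x tl' ih =>
    intro j acc htl hj0 hnh
    have hjlt : j < bl.length := by
      by_contra hge
      rw [List.drop_eq_nil_of_le (by omega)] at htl; exact (List.cons_ne_nil _ _) htl
    have htl' : tl' = bl.drop (j + 1) := by
      have h := congrArg List.tail htl
      rw [List.tail_cons] at h
      rw [h, ← List.drop_one, List.drop_drop, Nat.add_comm]
    have hxh : pvIsHeader x = false := hnh x List.mem_cons_self
    have hlen : lines.length = i0 + bl.length + rest'.length :=
      pv_len lines bl rest' i0 hdrop (by intro h; rw [h] at hjlt; simp at hjlt)
    rw [PySem.List.enumerate_cons, List.foldl_cons]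
    have hcast1 : ((i0 + j : ℕ) : Int) + 1 = ((i0 + (j + 1) : ℕ) : Int) := by push_cast; ring
    have hcast2 : ((j : ℕ) : Int) + 1 = (((j + 1 : ℕ)) : Int) := by push_cast; ring
    -- the A-side step on line x
    by_cases hM : pvIsMoveL x = true
    · -- the prev strings agree
      have hprev : (if ((i0 + j : ℕ) : Int) > 0 then
            PySem.Str.strip (PySem.List.pyGetD lines (((i0 + j : ℕ) : Int) - 1) "") else "")
          = (if ((j : ℕ) : Int) > 0 then
            PySem.Str.strip (PySem.List.pyGetD bl (((j : ℕ) : Int) - 1) "") else "") := by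
        rcases Nat.eq_zero_or_pos j with hj | hj
        · subst hj; rw [hj0 rfl]; norm_num
        · have h1 : ((i0 + j : ℕ) : Int) - 1 = ((i0 + (j - 1) : ℕ) : Int) := by omega
          have h2 : ((j : ℕ) : Int) - 1 = (((j - 1 : ℕ)) : Int) := by omega
          rw [if_pos (by push_cast; omega), if_pos (by omega), h1, h2,
            PySem.List.pyGetD_natCast, PySem.List.pyGetD_natCast,
            pv_getD_lines lines bl rest' i0 hdrop (j - 1) (by omega)]
      -- the MoveL test on the next strings agrees
      have hnext : PySem.Str.startswith (if ((i0 + j : ℕ) : Int) + 1 < (lines.length : Int) then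
            PySem.Str.strip (PySem.List.pyGetD lines (((i0 + j : ℕ) : Int) + 1) "") else "") "MoveL"
          = PySem.Str.startswith (if ((j : ℕ) : Int) + 1 < (bl.length : Int) then
            PySem.Str.strip (PySem.List.pyGetD bl (((j : ℕ) : Int) + 1) "") else "") "MoveL" := by
        by_cases hb : j + 1 < bl.length
        · rw [if_pos (by push_cast; omega), if_pos (by omega), hcast1, hcast2,
            PySem.List.pyGetD_natCast, PySem.List.pyGetD_natCast,
            pv_getD_lines lines bl rest' i0 hdrop (j + 1) hb]
        · rw [if_neg (show ¬(((j : ℕ) : Int) + 1 < (bl.length : Int)) from by omega)]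
          by_cases ha : i0 + j + 1 < lines.length
          · rw [if_pos (show ((i0 + j : ℕ) : Int) + 1 < (lines.length : Int) from by push_cast; omega),
              hcast1, PySem.List.pyGetD_natCast]
            have hj1 : j + 1 = bl.length := by omega
            rcases rest' with _ | ⟨r, rs⟩
            · simp at hlen; omega
            · have hr : pvIsHeader r = true := by
                rcases hrest with h | h
                · exact absurd h (List.cons_ne_nil _ _)
                · simpa using h
              have : lines.getD (i0 + (j + 1)) "" = r := by
                rw [List.getD_eq_getElem?_getD, ← List.getElem?_drop, hdrop, hj1,
                  List.getElem?_append_right (le_refl _)]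
                simp
              rw [this]
              have h1 := pv_header_not_moveL r hr
              unfold pvIsMoveL at h1
              rw [h1]
              decide
          · rw [if_neg (show ¬(((i0 + j : ℕ) : Int) + 1 < (lines.length : Int)) from by push_cast; omega)]
      simp only [pvAStep, hxh, Bool.false_eq_true, if_false, hM, if_true]
      rw [hprev, hnext]
      simp only [pvProcAux, hM, if_true]
      by_cases hc1 : (PySem.Str.startswith (if ((j : ℕ) : Int) > 0 then
            PySem.Str.strip (PySem.List.pyGetD bl (((j : ℕ) : Int) - 1) "") else "") "Laser_Punch_Cir_"
          && PySem.Str.startswith (if ((j : ℕ) : Int) + 1 < (bl.length : Int) then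
            PySem.Str.strip (PySem.List.pyGetD bl (((j : ℕ) : Int) + 1) "") else "") "MoveL") = true
      · rw [if_pos hc1, if_pos hc1, hcast1, hcast2,
          ih (j + 1) (acc ++ [x] ++ ["    Laser_Process_Param_In 25;"]) htl' (by omega)
            (fun y hy => hnh y (List.mem_cons_of_mem _ hy))]
        simp
      · rw [if_neg hc1, if_neg hc1]
        by_cases hc2 : (PySem.Str.startswith (if ((j : ℕ) : Int) > 0 then
              PySem.Str.strip (PySem.List.pyGetD bl (((j : ℕ) : Int) - 1) "") else "") "Laser_Punch_"
            && PySem.Str.startswith (if ((j : ℕ) : Int) + 1 < (bl.length : Int) then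
              PySem.Str.strip (PySem.List.pyGetD bl (((j : ℕ) : Int) + 1) "") else "") "MoveL") = true
        · rw [if_pos hc2, if_pos hc2, hcast1, hcast2,
            ih (j + 1) (acc ++ [x] ++ ["    Laser_Process_Param_In " ++ (PySem.Dict.mk pm).getD s lp ++ ";"]) htl' (by omega)
              (fun y hy => hnh y (List.mem_cons_of_mem _ hy))]
          simp
        · rw [if_neg hc2, if_neg hc2, hcast1, hcast2,
            ih (j + 1) (acc ++ [x]) htl' (by omega)
              (fun y hy => hnh y (List.mem_cons_of_mem _ hy))]
          simp
    · simp only [pvAStep, hxh, Bool.false_eq_true, if_false, hM]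
      simp only [pvProcAux, hM, Bool.false_eq_true, if_false]
      rw [hcast1, hcast2,
        ih (j + 1) (acc ++ [x]) htl' (by omega) (fun y hy => hnh y (List.mem_cons_of_mem _ hy))]
      simp

-- the first element surviving dropWhile fails the predicate
theorem pv_dropWhile_head {α : Type} (p : α → Bool) :
    ∀ (ls : List α) (d : α) (t : List α), ls.dropWhile p = d :: t → p d = false := by
  intro ls
  induction ls with
  | nil => intro d t h; simp [List.dropWhile] at h
  | cons a as ih =>
    intro d t h
    rw [List.dropWhile_cons] at h
    by_cases hp : p a = true
    · rw [if_pos hp] at h; exact ih d t h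
    · rw [if_neg hp] at h
      injection h with h1 _
      subst h1
      simpa using hp

-- A's fold over a suffix of lines starting at a block boundary equals B's per-block output
theorem pv_main (lines : List String) (pm : List (String × String)) (lp : String) :
    ∀ (rest : List String) (i0 : ℕ) (s : String) (acc : List String),
      lines.drop i0 = rest → (i0 = 0 → s = "") →
      (0 < i0 → rest ≠ [] → pvIsHeader (rest.headD "") = true) →
      (List.foldl (pvAStep lines pm lp) (acc, s) (PySem.List.enumerate rest ((i0 : ℕ) : Int))).1
        = acc ++ (pvBlocks rest).flatMap (pvBlockOut pm lp) := by
  intro rest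
  induction rest using pvBlocks.induct with
  | case1 =>
    intro i0 s acc _ _ _
    simp [pvBlocks, PySem.List.enumerate]
  | case2 l ls ih =>
    intro i0 s acc hdrop h0 hh
    have hls : ls.takeWhile (fun x => !pvIsHeader x) ++ ls.dropWhile (fun x => !pvIsHeader x) = ls :=
      List.takeWhile_append_dropWhile
    have hnhtw : ∀ x ∈ ls.takeWhile (fun x => !pvIsHeader x), pvIsHeader x = false := by
      intro x hx
      have := List.mem_takeWhile_imp hx
      simpa using this
    have hdwh : ls.dropWhile (fun x => !pvIsHeader x) = [] ∨
        pvIsHeader ((ls.dropWhile (fun x => !pvIsHeader x)).headD "") = true := by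
      cases hd : ls.dropWhile (fun x => !pvIsHeader x) with
      | nil => exact Or.inl rfl
      | cons d t =>
        right
        have := pv_dropWhile_head (fun x => !pvIsHeader x) ls d t hd
        simpa using this
    have hbl : lines.drop i0 = (l :: ls.takeWhile (fun x => !pvIsHeader x)) ++ ls.dropWhile (fun x => !pvIsHeader x) := by
      rw [hdrop]
      simp [hls]
    have hdrop2 : lines.drop (i0 + (l :: ls.takeWhile (fun x => !pvIsHeader x)).length)
        = ls.dropWhile (fun x => !pvIsHeader x) := by
      rw [← List.drop_drop, hbl, List.drop_left]
    have hpb : pvBlocks (l :: ls) = (l :: ls.takeWhile (fun x => !pvIsHeader x)) :: pvBlocks (ls.dropWhile (fun x => !pvIsHeader x)) := by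
      simp only [pvBlocks]
    have hsplit : PySem.List.enumerate (l :: ls) ((i0 : ℕ) : Int)
        = PySem.List.enumerate (l :: ls.takeWhile (fun x => !pvIsHeader x)) ((i0 : ℕ) : Int)
          ++ PySem.List.enumerate (ls.dropWhile (fun x => !pvIsHeader x))
              (((i0 : ℕ) : Int) + (l :: ls.takeWhile (fun x => !pvIsHeader x)).length) := by
      rw [show l :: ls = (l :: ls.takeWhile (fun x => !pvIsHeader x)) ++ ls.dropWhile (fun x => !pvIsHeader x) from by simp [hls]]
      rw [PySem.List.enumerate_append]
    rw [hsplit, List.foldl_append, hpb, List.flatMap_cons]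
    have hc2 : ((i0 : ℕ) : Int) + ((l :: ls.takeWhile (fun x => !pvIsHeader x)).length : ℕ)
        = ((i0 + (l :: ls.takeWhile (fun x => !pvIsHeader x)).length : ℕ) : Int) := by push_cast; ring
    by_cases hH : pvIsHeader l = true
    · rw [PySem.List.enumerate_cons, List.foldl_cons]
      have hstep : pvAStep lines pm lp (acc, s) (((i0 : ℕ) : Int), l) = (acc ++ [l], pvParseSection l) := by
        simp only [pvAStep, hH, if_true, pv_header_not_moveL l hH, Bool.false_eq_true, if_false]
      rw [hstep]
      have hc1 : ((i0 : ℕ) : Int) + 1 = ((i0 + 1 : ℕ) : Int) := by push_cast; ring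
      have htail := pv_tail lines pm lp (l :: ls.takeWhile (fun x => !pvIsHeader x))
        (ls.dropWhile (fun x => !pvIsHeader x)) i0 hbl hdwh (pvParseSection l)
        (ls.takeWhile (fun x => !pvIsHeader x)) 1 (acc ++ [l]) (by simp) (by omega) hnhtw
      rw [hc1, htail]
      have hih := ih (i0 + (l :: ls.takeWhile (fun x => !pvIsHeader x)).length) (pvParseSection l)
        (acc ++ [l] ++ pvProcAux (l :: ls.takeWhile (fun x => !pvIsHeader x))
          ((PySem.Dict.mk pm).getD (pvParseSection l) lp) ((1 : ℕ) : Int) (ls.takeWhile (fun x => !pvIsHeader x)))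
        hdrop2 (by intro h; simp only [List.length_cons] at h; omega)
        (by
          intro _ hne
          rcases hdwh with h | h
          · exact absurd h hne
          · exact h)
      rw [hc2, hih]
      have hbo : pvBlockOut pm lp (l :: ls.takeWhile (fun x => !pvIsHeader x))
          = l :: pvProcAux (l :: ls.takeWhile (fun x => !pvIsHeader x))
              ((PySem.Dict.mk pm).getD (pvParseSection l) lp) ((1 : ℕ) : Int) (ls.takeWhile (fun x => !pvIsHeader x)) := by
        simp only [pvBlockOut, List.headD_cons, hH, if_true]
        simp only [pvProcAux, pv_header_not_moveL l hH, Bool.false_eq_true, if_false]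
        norm_num
      rw [hbo]
      simp [List.append_assoc]
    · have hi0 : i0 = 0 := by
        by_contra h
        have := hh (Nat.pos_of_ne_zero h) (List.cons_ne_nil _ _)
        simp only [List.headD_cons] at this
        exact hH this
      have hs : s = "" := h0 hi0
      subst hi0
      subst hs
      have htail := pv_tail lines pm lp (l :: ls.takeWhile (fun x => !pvIsHeader x))
        (ls.dropWhile (fun x => !pvIsHeader x)) 0 hbl hdwh ""
        (l :: ls.takeWhile (fun x => !pvIsHeader x)) 0 acc (by simp) (fun _ => rfl)
        (by
          intro x hx
          rcases List.mem_cons.mp hx with rfl | hx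
          · simpa using hH
          · exact hnhtw x hx)
      simp only [Nat.add_zero, Nat.zero_add, Nat.cast_zero] at htail hc2 hdrop2 ⊢
      rw [htail]
      have hih := ih ((l :: ls.takeWhile (fun x => !pvIsHeader x)).length) ""
        (acc ++ pvProcAux (l :: ls.takeWhile (fun x => !pvIsHeader x))
          ((PySem.Dict.mk pm).getD "" lp) 0 (l :: ls.takeWhile (fun x => !pvIsHeader x)))
        hdrop2 (by intro h; simp only [List.length_cons] at h; omega)
        (by
          intro _ hne
          rcases hdwh with h | h
          · exact absurd h hne
          · exact h)
      rw [hc2, hih]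
      have hbo : pvBlockOut pm lp (l :: ls.takeWhile (fun x => !pvIsHeader x))
          = pvProcAux (l :: ls.takeWhile (fun x => !pvIsHeader x))
              ((PySem.Dict.mk pm).getD "" lp) 0 (l :: ls.takeWhile (fun x => !pvIsHeader x)) := by
        simp only [pvBlockOut, List.headD_cons, hH, Bool.false_eq_true, if_false]
      rw [hbo]
      simp [List.append_assoc]

-- ===== VERDICT (by name: the statement is the Claim_ definition above) =====
theorem add_laser_process_param_spec : Claim_equal_add_laser_process_param := by
  unfold Claim_equal_add_laser_process_param
  intro text param_map laser_prc_par _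
  unfold Spec_add_laser_process_param add_laser_process_param add_laser_process_param_alt
  have h := pv_main ((PySem.Str.split? text "\n").getD []) param_map laser_prc_par
    ((PySem.Str.split? text "\n").getD []) 0 "" [] (by simp) (fun _ => rfl) (by omega)
  simp only [Nat.cast_zero] at h
  simp only [h, List.nil_append]
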